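-- pv_equiv track=rewrite | github.com/lschanne/DailyCodingProblems | year_2019/month_06/2019_06_14__k_deletions_to_palindrome.py | k_deletions_to_palindrome
-- ===== SOURCE A (Python) =====
-- def k_deletions_to_palindrome(string, k=0):
--     def _recurse(string, k):
--         if string == string[::-1]:
--             return True
--
--         if k <= 0:
--             return False
--
--         for idx in range(len(string)):
--             if _recurse(string[:idx] + string[idx + 1:], k - 1):
--                 return True
--
--         return False
--
--     return _recurse(string, k)
-- ===== SOURCE B (Python) =====
-- def k_deletions_to_palindrome(string, k=0):
--     level = {string}
--     while True:
--         if any(s == s[::-1] for s in level):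
--             return True
--         if k <= 0:
--             return False
--         level = {s[:i] + s[i + 1:] for s in level for i in range(len(s))}
--         k -= 1
-- ===== Notes on version B (the rewrite author's own statement) =====
-- stated objective: alternative
-- what changed: Replaces A's depth-first recursion over deletion sequences with an iterative breadth-first search over levels of distinct strings, deduplicating each level with a set so a string reached by deleting the same positions in different orders is explored once.
import Mathlib
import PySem

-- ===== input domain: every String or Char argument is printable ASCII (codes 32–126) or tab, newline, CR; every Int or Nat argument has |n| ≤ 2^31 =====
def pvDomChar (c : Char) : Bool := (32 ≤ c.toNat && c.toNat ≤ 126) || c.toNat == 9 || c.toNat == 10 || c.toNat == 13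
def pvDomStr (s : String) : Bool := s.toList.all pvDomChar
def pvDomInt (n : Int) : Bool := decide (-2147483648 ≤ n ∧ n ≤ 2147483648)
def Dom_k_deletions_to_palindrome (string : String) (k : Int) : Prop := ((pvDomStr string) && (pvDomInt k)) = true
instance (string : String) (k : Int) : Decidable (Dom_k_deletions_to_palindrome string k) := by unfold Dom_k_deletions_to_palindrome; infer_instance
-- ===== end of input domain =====

-- B replaces A's depth-first recursion over deletion sequences by an iterative
-- breadth-first search over deduplicated levels of distinct strings (objective: alternative).

-- ===== PORT A =====
-- deletion of the character at index idx: string[:idx] + string[idx+1:]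
def pvDel (l : List Char) (idx : Nat) : List Char := l.take idx ++ l.drop (idx + 1)

theorem pvDel_length_lt (l : List Char) (idx : Nat) (h : idx < l.length) :
    (pvDel l idx).length < l.length := by
  simp [pvDel]; omega

-- _recurse: palindrome check, k <= 0 check, then the for-loop over range(len(string))
-- (early return True on a hit = List.any over the range)
def pvRecurseA (l : List Char) (k : Int) : Bool :=
  if l = l.reverse then true
  else if k ≤ 0 then false
  else (List.range l.length).attach.any fun idx => pvRecurseA (pvDel l idx.1) (k - 1)
termination_by l.length
decreasing_by
  exact pvDel_length_lt l idx.1 (List.mem_range.mp idx.2)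

def k_deletions_to_palindrome (string : String) (k : Int) : Bool :=
  pvRecurseA string.toList k

-- ===== PORT B =====
-- next level: {s[:i] + s[i+1:] for s in level for i in range(len(s))}
def pvExpand (level : List (List Char)) : PySem.Set (List Char) :=
  PySem.Set.ofList (level.flatMap fun s => (List.range s.length).map (pvDel s))

-- the while-loop of Source B, state = (level, k)
def pvLoopB (level : List (List Char)) (k : Int) : Bool :=
  if level.any (fun s => s = s.reverse) then true
  else if k ≤ 0 then false
  else pvLoopB (pvExpand level) (k - 1)
termination_by k.toNat
decreasing_by
  omega

def k_deletions_to_palindrome_alt (string : String) (k : Int) : Bool :=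
  pvLoopB (PySem.Set.ofList [string.toList]) k

-- ===== PRECONDITION & SPEC =====
def Spec_k_deletions_to_palindrome (string : String) (k : Int) (out : Bool) : Prop := out = k_deletions_to_palindrome_alt string k
instance (string : String) (k : Int) (out : Bool) : Decidable (Spec_k_deletions_to_palindrome string k out) := by unfold Spec_k_deletions_to_palindrome; infer_instance

-- ===== CLAIM (what is proved, stated in full; the proofs are below) =====
def Claim_equal_k_deletions_to_palindrome : Prop := ∀ (string : String) (k : Int), Dom_k_deletions_to_palindrome string k → Spec_k_deletions_to_palindrome string k (k_deletions_to_palindrome string k)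

-- ===== LEMMAS AND PROOFS =====

-- any over a deduplicated list = any over the list (membership is preserved)
theorem any_ofList (xs : List (List Char)) (p : List Char → Bool) :
    (PySem.Set.ofList xs).any p = xs.any p := by
  apply Bool.eq_iff_iff.mpr
  simp only [List.any_eq_true]
  constructor
  · rintro ⟨x, hx, hp⟩; exact ⟨x, (PySem.Set.mem_ofList _ _).mp hx, hp⟩
  · rintro ⟨x, hx, hp⟩; exact ⟨x, (PySem.Set.mem_ofList _ _).mpr hx, hp⟩

-- any is preserved under a pointwise-equal predicate
theorem any_congr_mem {α : Type} (l : List α) (p q : α → Bool) (h : ∀ x ∈ l, p x = q x) :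
    l.any p = l.any q := by
  induction l with
  | nil => rfl
  | cons a t ih =>
    simp only [List.any_cons, h a (List.mem_cons_self), ih (fun x hx => h x (List.mem_cons_of_mem a hx))]

-- the BFS level invariant: pvLoopB on a level = "some string of the level succeeds in A"
theorem pvLoopB_eq_any (k : Int) (level : List (List Char)) :
    pvLoopB level k = level.any (fun s => pvRecurseA s k) := by
  rw [pvLoopB.eq_def]
  by_cases hp : (level.any fun s => decide (s = s.reverse)) = true
  · rw [if_pos hp]
    obtain ⟨s, hs, hpal⟩ := List.any_eq_true.mp hp
    symm
    rw [List.any_eq_true]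
    refine ⟨s, hs, ?_⟩
    rw [pvRecurseA.eq_def]
    simp only [decide_eq_true_eq] at hpal
    rw [if_pos hpal]
  · rw [if_neg hp]
    have hnp : ∀ s ∈ level, ¬ (s = s.reverse) := by
      intro s hs h
      exact hp (List.any_eq_true.mpr ⟨s, hs, decide_eq_true h⟩)
    by_cases hk : k ≤ 0
    · rw [if_pos hk]
      symm
      rw [List.any_eq_false]
      intro s hs
      rw [pvRecurseA.eq_def, if_neg (hnp s hs), if_pos hk]
      simp
    · have hk' : (k - 1).toNat < k.toNat := by omega
      rw [if_neg hk, pvLoopB_eq_any (k - 1) (pvExpand level)]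
      unfold pvExpand
      rw [any_ofList, List.any_flatMap]
      apply any_congr_mem
      intro s hs
      rw [List.any_map, pvRecurseA.eq_def, if_neg (hnp s hs), if_neg hk]
      apply Bool.eq_iff_iff.mpr
      rw [List.any_eq_true, List.any_eq_true]
      constructor
      · rintro ⟨i, hi, h⟩
        exact ⟨⟨i, hi⟩, List.mem_attach _ _, h⟩
      · rintro ⟨⟨i, hi⟩, _, h⟩
        exact ⟨i, hi, h⟩
termination_by k.toNat

-- ===== VERDICT (by name: the statement is the Claim_ definition above) =====
theorem k_deletions_to_palindrome_spec : Claim_equal_k_deletions_to_palindrome := by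
  intro string k _
  unfold Spec_k_deletions_to_palindrome k_deletions_to_palindrome k_deletions_to_palindrome_alt
  rw [pvLoopB_eq_any]
  simp [PySem.Set.ofList]
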